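-- pv_equiv track=rewrite | github.com/gaspF/Pizzeria-webapp-project | pur_beurre/management/commands/fill_database.py | request_cleaner
-- ===== SOURCE A (Python) =====
-- from string import punctuation, digits
--
-- def request_cleaner(my_request):
--     mr = my_request
--     for character in punctuation:
--         my_request = my_request.replace(character, '')
--     for character in digits:
--         my_request = my_request.replace(character, '')
--
--     my_request = my_request.title().strip()
--     return my_request
-- ===== SOURCE B (Python) =====
-- from string import punctuation, digits
--
-- def request_cleaner(my_request):
--     bad = set(punctuation + digits)
--     cleaned = ''.join(c for c in my_request if c not in bad)
--     return cleaned.title().strip()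
-- ===== Notes on version B (the rewrite author's own statement) =====
-- stated objective: simpler
-- what changed: A makes one .replace() pass over the string for each of the 42 punctuation/digit characters; B builds a set of disallowed characters once and makes a single filtering pass over the input, then titles and strips.
import Mathlib
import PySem

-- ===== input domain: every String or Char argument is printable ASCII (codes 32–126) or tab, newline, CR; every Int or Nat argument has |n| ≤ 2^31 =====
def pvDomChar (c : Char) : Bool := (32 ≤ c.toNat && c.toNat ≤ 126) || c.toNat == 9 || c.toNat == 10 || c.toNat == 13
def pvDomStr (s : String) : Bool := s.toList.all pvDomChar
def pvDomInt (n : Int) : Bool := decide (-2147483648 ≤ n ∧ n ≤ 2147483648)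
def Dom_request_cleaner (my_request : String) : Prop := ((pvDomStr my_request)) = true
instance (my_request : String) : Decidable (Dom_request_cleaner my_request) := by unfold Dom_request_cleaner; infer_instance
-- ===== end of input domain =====

-- B removes all punctuation/digit characters in ONE pass over the input against a
-- precomputed set, instead of A's one .replace() scan per removal character; simpler.

-- string.punctuation and string.digits (module constants of the Python source)
def pvPunctuation : String := "!\"#$%&'()*+,-./:;<=>?@[\\]^_`{|}~"
def pvDigits : String := "0123456789"

-- hand port of Python str.title(), exact on ASCII: a letter after a non-letter is
-- uppercased, a letter after a letter is lowercased, other characters unchanged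
def pvTitle : Bool → List Char → List Char
  | _, [] => []
  | prev, c :: rest =>
    if PySem.Chars.isalpha c then
      (if prev then PySem.Chars.lowerChar c else PySem.Chars.upperChar c) :: pvTitle true rest
    else c :: pvTitle false rest

-- ===== PORT A =====
def request_cleaner (my_request : String) : String :=
  -- (A binds 'mr = my_request' and never uses it)
  let s1 := pvPunctuation.toList.foldl
    (fun s character => PySem.Str.replace s (String.singleton character) "") my_request
  let s2 := pvDigits.toList.foldl
    (fun s character => PySem.Str.replace s (String.singleton character) "") s1
  PySem.Str.strip (String.ofList (pvTitle false s2.toList))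

-- ===== PORT B =====
def request_cleaner_alt (my_request : String) : String :=
  let bad : PySem.Set Char := PySem.Set.ofList (pvPunctuation.toList ++ pvDigits.toList)
  let cleaned := String.ofList (my_request.toList.filter (fun c => !(bad.contains c)))
  PySem.Str.strip (String.ofList (pvTitle false cleaned.toList))

-- ===== PRECONDITION & SPEC =====
def Spec_request_cleaner (my_request : String) (out : String) : Prop := out = request_cleaner_alt my_request
instance (my_request : String) (out : String) : Decidable (Spec_request_cleaner my_request out) := by unfold Spec_request_cleaner; infer_instance

-- ===== CLAIM (what is proved, stated in full; the proofs are below) =====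
def Claim_equal_request_cleaner : Prop := ∀ (my_request : String), Dom_request_cleaner my_request → Spec_request_cleaner my_request (request_cleaner my_request)

-- ===== LEMMAS AND PROOFS =====

-- replace.go with a single removal char, enough fuel and empty replacement = filter
lemma pv_go_single (c : Char) : ∀ (l : List Char) (fuel : Nat) (acc : List Char),
    l.length ≤ fuel →
    PySem.Chars.replace.go [c] [] fuel l acc = acc.reverse ++ l.filter (fun x => !(x == c)) := by
  intro l
  induction l with
  | nil =>
    intro fuel acc _
    cases fuel <;> simp [PySem.Chars.replace.go]
  | cons x t ih =>
    intro fuel acc h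
    cases fuel with
    | zero => simp at h
    | succ f =>
      by_cases hx : x = c
      · subst hx
        have := ih f (acc) (Nat.le_of_succ_le_succ h)
        simp [PySem.Chars.replace.go, List.isPrefixOf, this]
      · have := ih f (x :: acc) (by simpa using Nat.le_of_succ_le_succ h)
        simp [PySem.Chars.replace.go, List.isPrefixOf, hx, Ne.symm hx, this]

lemma pv_replace_single (c : Char) (l : List Char) :
    PySem.Chars.replace l [c] [] = l.filter (fun x => !(x == c)) := by
  simp [PySem.Chars.replace, pv_go_single c l l.length [] (le_refl _)]

-- folding single-char deletions over a list of chars = one filter against that list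
lemma pv_foldl_replace (cs : List Char) : ∀ (s : String),
    (cs.foldl (fun s character => PySem.Str.replace s (String.singleton character) "") s).toList
      = s.toList.filter (fun x => !(cs.contains x)) := by
  induction cs with
  | nil => intro s; simp
  | cons c t ih =>
    intro s
    have h1 : (PySem.Str.replace s (String.singleton c) "").toList
        = s.toList.filter (fun x => !(x == c)) := by
      simp [PySem.Str.toList_replace, String.singleton, pv_replace_single]
    simp only [List.foldl_cons, ih, h1, List.filter_filter]
    apply List.filter_congr
    intro x _
    by_cases hx : x = c <;> simp [hx]

lemma pv_toList_mk (l : List Char) : (String.ofList l).toList = l := by simp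

theorem request_cleaner_spec : Claim_equal_request_cleaner := by
  intro my_request _
  show request_cleaner my_request = request_cleaner_alt my_request
  unfold request_cleaner request_cleaner_alt
  simp only [pv_foldl_replace, pv_toList_mk, List.filter_filter]
  have h : my_request.toList.filter
        (fun a => !pvDigits.toList.contains a && !pvPunctuation.toList.contains a)
      = my_request.toList.filter
        (fun c => !(PySem.Set.ofList (pvPunctuation.toList ++ pvDigits.toList)).contains c) := by
    apply List.filter_congr
    intro x _
    have hmem : (PySem.Set.ofList (pvPunctuation.toList ++ pvDigits.toList)).contains x
        = (pvPunctuation.toList ++ pvDigits.toList).contains x := by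
      simp only [PySem.Set.contains, List.contains_eq_mem]
      simp [PySem.Set.mem_ofList]
    rw [hmem, List.contains_append]
    cases h1 : pvPunctuation.toList.contains x <;>
      cases h2 : pvDigits.toList.contains x <;> simp
  exact congrArg (fun l => PySem.Str.strip (String.ofList (pvTitle false l))) h
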